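-- pv_equiv track=rewrite | github.com/NHCsiam/BRACU | cse422/lab3/02_20101570_NaimulHaqueChowdhury.py | fitnessSelection
-- ===== SOURCE A (Python) =====
-- def fitnessSelection(population,values):
--     fit=[]
--     for i in population:
--         summ=0
--         for j in range(len(i)):
--             if i[j]==1:
--                 summ+=values[j]                        #before this line "if" condition will check in which index of chromosome list matchs to 1, when it matchs it will the value of that index in value list which we got from dictionary. this is how it will find those values and will add it in sum variable. finally we will get the fitness value
--         fit.append(summ)
--     minfit=fit.index(min(fit))                         #get the index number from fit list
--     population.pop(minfit)                             #delete that index from population list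
--     fit.pop(minfit)                                    #delete that index from fit list
--     return population, fit
-- ===== SOURCE B (Python) =====
-- def fitnessSelection(population, values):
--     # Streaming removal: hold out the current least-fit candidate ("champ") and
--     # buffer everything after it; a strictly smaller fitness flushes champ+buffer
--     # to the output and becomes the new champ ("first minimum wins" on ties).
--     # Note: A mutates `population` in place; B builds fresh lists (return value equal).
--     out_pop, out_fit = [], []
--     champ = None                      # (chromosome, fitness) slated for removal
--     buf_pop, buf_fit = [], []
--     for c in population:
--         f = sum(v for g, v in zip(c, values) if g == 1)
--         if champ is None:
--             champ = (c, f)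
--         elif f < champ[1]:
--             out_pop.append(champ[0]); out_fit.append(champ[1])
--             out_pop += buf_pop;       out_fit += buf_fit
--             buf_pop, buf_fit = [], []
--             champ = (c, f)
--         else:
--             buf_pop.append(c); buf_fit.append(f)
--     return out_pop + buf_pop, out_fit + buf_fit
-- ===== Notes on version B (the rewrite author's own statement) =====
-- stated objective: alternative
-- what changed: Replaces A's staged min()/index()/pop() passes with a single streaming pass that builds the surviving lists directly: a held-out 'champion' (current first-minimum candidate) plus a buffer of later elements, flushed whenever a strictly smaller fitness arrives, so no minimum index is ever computed or popped.
import Mathlib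
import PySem

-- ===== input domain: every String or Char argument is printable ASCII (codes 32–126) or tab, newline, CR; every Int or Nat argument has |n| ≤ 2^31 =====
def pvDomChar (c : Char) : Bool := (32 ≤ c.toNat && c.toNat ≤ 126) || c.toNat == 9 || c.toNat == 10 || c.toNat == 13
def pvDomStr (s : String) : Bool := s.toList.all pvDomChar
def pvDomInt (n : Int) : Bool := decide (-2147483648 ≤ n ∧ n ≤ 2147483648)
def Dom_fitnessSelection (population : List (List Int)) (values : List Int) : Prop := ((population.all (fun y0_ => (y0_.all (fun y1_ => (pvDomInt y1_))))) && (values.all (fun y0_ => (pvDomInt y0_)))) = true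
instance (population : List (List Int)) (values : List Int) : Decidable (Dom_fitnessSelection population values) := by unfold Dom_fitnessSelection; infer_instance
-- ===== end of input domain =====

-- B removes the least-fit chromosome in ONE streaming pass (held-out champion + buffer) instead of
-- A's min()/index()/pop() passes; equivalence is about the RETURN value (A also pops the same
-- element of `population` in place; B leaves the argument untouched).

-- ===== PORT A =====
def fitnessSelection (population : List (List Int)) (values : List Int) : List (List Int) × List Int :=
  let fit := population.foldl (fun fit i =>
    fit ++ [(PySem.List.pyRange 0 (i.length : Int) 1).foldl
      (fun summ j =>
        -- i[j] is always in range (j ∈ range(len(i))); values[j] raises IndexError when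
        -- j ≥ len(values), which Pre_ excludes, so pyGetD is exact on Pre_.
        if PySem.List.pyGetD i j 0 == 1 then summ + PySem.List.pyGetD values j 0 else summ) 0]) []
  match PySem.List.min? fit (fun x => x) with
  | none => (population, fit)          -- min([]) raises ValueError: excluded by Pre_
  | some m =>
    -- min(fit) is a member of fit, so index? is always some; the .getD 0 default is never used
    let minfit : Nat := (PySem.List.index? fit m).getD 0
    match PySem.List.pop? population (minfit : Int), PySem.List.pop? fit (minfit : Int) with
    | some (_, pop'), some (_, fit') => (pop', fit')
    | _, _ => (population, fit)        -- unreachable: minfit < len(fit) = len(population)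

-- ===== PORT B =====
-- helper for B: f = sum(v for g, v in zip(c, values) if g == 1)
def fitB (chrom : List Int) (values : List Int) : Int :=
  (((chrom.zip values).filter (fun q => q.1 == 1)).map (fun q => q.2)).sum

-- B's loop state: (out_pop, out_fit, champ, buf_pop, buf_fit)
def fitnessSelection_alt (population : List (List Int)) (values : List Int) : List (List Int) × List Int :=
  let st := population.foldl
    (fun (st : List (List Int) × List Int × Option (List Int × Int) × List (List Int) × List Int) c =>
      let f := fitB c values
      match st.2.2.1 with
      | none => (st.1, st.2.1, some (c, f), st.2.2.2.1, st.2.2.2.2)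
      | some ch =>
        if f < ch.2 then
          (st.1 ++ [ch.1] ++ st.2.2.2.1, st.2.1 ++ [ch.2] ++ st.2.2.2.2, some (c, f), [], [])
        else
          (st.1, st.2.1, some ch, st.2.2.2.1 ++ [c], st.2.2.2.2 ++ [f]))
    ([], [], none, [], [])
  (st.1 ++ st.2.2.2.1, st.2.1 ++ st.2.2.2.2)

-- ===== PRECONDITION & SPEC =====
-- Pre_ excludes exactly the inputs where A raises: an empty population (min([]) is a ValueError)
-- and a chromosome with a 1 at an index ≥ len(values) (values[j] is an IndexError).
def Pre_fitnessSelection (population : List (List Int)) (values : List Int) : Prop :=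
  population ≠ [] ∧
  ∀ c ∈ population, ∀ k, k < c.length → c.getD k 0 = 1 → k < values.length
instance (population : List (List Int)) (values : List Int) : Decidable (Pre_fitnessSelection population values) := by
  unfold Pre_fitnessSelection; infer_instance
def pvWitness_fitnessSelection : List (List Int) × List Int := ([[1, 0], [0, 1], [1, 1]], [3, 4])

def Spec_fitnessSelection (population : List (List Int)) (values : List Int) (out : List (List Int) × List Int) : Prop := out = fitnessSelection_alt population values
instance (population : List (List Int)) (values : List Int) (out : List (List Int) × List Int) : Decidable (Spec_fitnessSelection population values out) := by unfold Spec_fitnessSelection; infer_instance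

-- ===== CLAIM (what is proved, stated in full; the proofs are below) =====
def Claim_equal_fitnessSelection : Prop := ∀ (population : List (List Int)) (values : List Int), Dom_fitnessSelection population values → Pre_fitnessSelection population values → Spec_fitnessSelection population values (fitnessSelection population values)

-- ===== LEMMAS AND PROOFS =====

-- A's inner loop over range(len(c)), restated over List.range, equals fitB (with accumulator)
theorem fit_range_aux (c : List Int) : ∀ (values : List Int) (s : Int),
    (∀ k, k < c.length → c.getD k 0 = 1 → k < values.length) →
    (List.range c.length).foldl
      (fun s k => if c.getD k 0 == 1 then s + values.getD k 0 else s) s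
      = s + fitB c values := by
  induction c with
  | nil => intro values s h; simp [fitB]
  | cons x c' ih =>
    intro values s h
    rw [List.length_cons, List.range_succ_eq_map, List.foldl_cons, List.foldl_map]
    simp only [List.getD_cons_succ, List.getD_cons_zero, Nat.succ_eq_add_one]
    cases values with
    | nil =>
      have hx : x ≠ 1 := by
        intro hx
        have h0' := h 0 (by simp) (by simp [hx])
        simp at h0'
      have h' : ∀ k, k < c'.length → c'.getD k 0 = 1 → k < ([] : List Int).length := by
        intro k hk hk1
        have := h (k + 1) (by simp; omega) (by simpa using hk1)
        simp at this
      have hbeq : (x == 1) = false := by simp [hx]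
      rw [hbeq]
      simp only [Bool.false_eq_true, if_false, List.getD_nil]
      have := ih [] s h'
      simp only [List.getD_nil] at this
      rw [this]
      simp [fitB]
    | cons v vs =>
      have h' : ∀ k, k < c'.length → c'.getD k 0 = 1 → k < vs.length := by
        intro k hk hk1
        have := h (k + 1) (by simp; omega) (by simpa using hk1)
        simpa using this
      simp only [List.getD_cons_zero, List.getD_cons_succ]
      rw [ih vs _ h']
      simp only [fitB, List.zip_cons_cons, List.filter_cons]
      by_cases hx : x = 1
      · simp [hx]
        ring
      · have hbeq : (x == 1) = false := by simp [hx]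
        simp [hbeq]

-- A's inner loop (as written, over pyRange) equals fitB
theorem fitA_eq (c values : List Int)
    (h : ∀ k, k < c.length → c.getD k 0 = 1 → k < values.length) :
    (PySem.List.pyRange 0 (c.length : Int) 1).foldl
      (fun summ j =>
        if PySem.List.pyGetD c j 0 == 1 then summ + PySem.List.pyGetD values j 0 else summ) 0
      = fitB c values := by
  rw [PySem.List.pyRange_one, List.foldl_map]
  simp only [sub_zero, Int.toNat_natCast, zero_add, PySem.List.pyGetD_natCast]
  simpa using fit_range_aux c values 0 h

-- B's loop body, named for the invariant proof
def stepB (values : List Int)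
    (st : List (List Int) × List Int × Option (List Int × Int) × List (List Int) × List Int)
    (c : List Int) :
    List (List Int) × List Int × Option (List Int × Int) × List (List Int) × List Int :=
  let f := fitB c values
  match st.2.2.1 with
  | none => (st.1, st.2.1, some (c, f), st.2.2.2.1, st.2.2.2.2)
  | some ch =>
    if f < ch.2 then
      (st.1 ++ [ch.1] ++ st.2.2.2.1, st.2.1 ++ [ch.2] ++ st.2.2.2.2, some (c, f), [], [])
    else
      (st.1, st.2.1, some ch, st.2.2.2.1 ++ [c], st.2.2.2.2 ++ [f])

-- minimum of a nonempty fitness list, in the shape min?_id_cons produces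
def minF : List Int → Int
  | [] => 0
  | x :: t => t.foldl min x

-- INVARIANT of B's loop: after a nonempty prefix xs with fitness list F, minimum M and first
-- minimum position j, the state is (xs.take j, F.take j, some (xs[j], M), xs.drop (j+1), F.drop (j+1)).
theorem foldB_inv (values : List Int) (xs : List (List Int)) (hne : xs ≠ []) :
    ∀ (F : List Int) (M : Int) (j : Nat),
    F = xs.map (fun c => fitB c values) → M = minF F → PySem.List.index? F M = some j →
    xs.foldl (stepB values) ([], [], none, [], []) =
      (xs.take j, F.take j, some (xs.getD j [], M), xs.drop (j + 1), F.drop (j + 1)) := by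
  induction xs using List.reverseRecOn with
  | nil => exact absurd rfl hne
  | append_singleton xs x ih =>
    intro F M j hF hM hj
    cases xs with
    | nil =>
      simp only [List.nil_append, List.map_cons, List.map_nil] at hF
      subst hF
      simp only [minF, List.foldl_nil] at hM
      subst hM
      rw [PySem.List.index?_cons_self] at hj
      obtain rfl : j = 0 := by simpa using hj.symm
      simp [stepB]
    | cons y ys =>
      -- tail data for the prefix y :: ys
      set xs' := y :: ys with hxs'
      set F' := xs'.map (fun c => fitB c values) with hF'
      set M' := minF F' with hM'
      have hF'ne : F' ≠ [] := by simp [hF', hxs']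
      have hM'mem : M' ∈ F' := by
        obtain ⟨a, t, hat⟩ := List.exists_cons_of_ne_nil hF'ne
        rw [hM', hat]
        rcases PySem.List.foldl_min_mem t a with h | h
        · simp [minF, h]
        · simp only [minF]
          exact List.mem_cons_of_mem _ h
      obtain ⟨j', hj'⟩ : ∃ j', PySem.List.index? F' M' = some j' :=
        Option.isSome_iff_exists.mp ((PySem.List.index?_isSome_iff F' M').mpr hM'mem)
      obtain ⟨hj'len, hFj', hfirst⟩ := PySem.List.getElem_of_index?_eq_some hj'
      have hIH := ih (by simp [hxs']) F' M' j' hF' hM' hj'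
      have hxlen : xs'.length = F'.length := by simp [hF']
      -- the appended element's fitness
      set f := fitB x values with hf
      have hFapp : F = F' ++ [f] := by rw [hF, List.map_append, hF', hf]; rfl
      have hMapp : M = min M' f := by
        obtain ⟨a, t, hat⟩ := List.exists_cons_of_ne_nil hF'ne
        rw [hM, hFapp, hM', hat]
        simp [minF, List.foldl_append]
      have hM'le : ∀ z ∈ F', M' ≤ z := by
        obtain ⟨a, t, hat⟩ := List.exists_cons_of_ne_nil hF'ne
        intro z hz
        rw [hM', hat]
        rw [hat] at hz
        simp only [minF]
        rcases List.mem_cons.mp hz with rfl | hz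
        · exact (PySem.List.foldl_min_le t z).1
        · exact (PySem.List.foldl_min_le t a).2 z hz
      rw [List.foldl_append, hIH, List.foldl_cons, List.foldl_nil]
      by_cases hlt : f < M'
      · -- new strict minimum at the end: flush champion and buffer, hold x
        have hMf : M = f := by rw [hMapp]; exact min_eq_right (le_of_lt hlt)
        have hfnotin : f ∉ F' := fun hmem => absurd (hM'le f hmem) (not_le.mpr hlt)
        have hjval : j = F'.length := by
          have := PySem.List.index?_append_singleton_self F' f hfnotin
          rw [hFapp, hMf] at hj
          rw [this] at hj
          exact (Option.some_injective _ hj).symm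
        have hgetj : xs'.getD j' [] = xs'[j'] := by
          rw [List.getD_eq_getElem?_getD, List.getElem?_eq_getElem (by omega : j' < xs'.length)]
          rfl
        simp only [stepB, hgetj]
        rw [if_pos hlt]
        -- take j' ++ xs'[j'] :: drop (j'+1) = xs'
        have hsplit : xs'.take j' ++ [xs'[j']] ++ xs'.drop (j' + 1) = xs' := by
          rw [List.append_assoc, List.singleton_append, List.getElem_cons_drop,
              List.take_append_drop]
        have hsplitF : F'.take j' ++ [F'[j']] ++ F'.drop (j' + 1) = F' := by
          rw [List.append_assoc, List.singleton_append, List.getElem_cons_drop,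
              List.take_append_drop]
        rw [hFj'] at hsplitF
        rw [hsplit, hsplitF, hjval, hMf]
        have hjx : j = xs'.length := by omega
        simp only [Prod.mk.injEq]
        refine ⟨?_, ?_, ?_, ?_, ?_⟩
        · rw [← hxlen]; simp
        · rw [hFapp]; simp
        · rw [← hxlen]
          congr 2
          rw [List.getD_eq_getElem?_getD, List.getElem?_concat_length]
          rfl
        · rw [← hxlen]
          symm; apply List.drop_eq_nil_of_le; simp
        · rw [hFapp]
          symm; apply List.drop_eq_nil_of_le; simp
      · -- minimum and its first position unchanged; x joins the buffer
        have hMM' : M = M' := by rw [hMapp]; exact min_eq_left (not_lt.mp hlt)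
        have hjj' : j = j' := by
          rw [hFapp, hMM', PySem.List.index?_append_of_mem [f] hM'mem, hj'] at hj
          exact (Option.some_injective _ hj).symm
        subst hjj'
        have hgetx : (xs' ++ [x]).getD j [] = xs'.getD j [] := by
          rw [List.getD_eq_getElem?_getD, List.getD_eq_getElem?_getD,
              List.getElem?_append_left (by omega : j < xs'.length)]
        have hgetj : xs'.getD j [] = xs'[j] := by
          rw [List.getD_eq_getElem?_getD, List.getElem?_eq_getElem (by omega : j < xs'.length)]
          rfl
        simp only [stepB, hgetj]
        rw [if_neg hlt]
        rw [hMM', hgetx, hgetj]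
        simp only [Prod.mk.injEq]
        refine ⟨?_, ?_, trivial, ?_, ?_⟩
        · rw [List.take_append_of_le_length (by omega)]
        · rw [hFapp, List.take_append_of_le_length (by omega)]
        · rw [List.drop_append_of_le_length (by omega)]
        · rw [hFapp, List.drop_append_of_le_length (by omega)]

-- ===== VERDICT (by name: the statement is the Claim_ definition above) =====
theorem fitnessSelection_spec : Claim_equal_fitnessSelection := by
  intro population values _hdom hpre
  obtain ⟨hne, hidx⟩ := hpre
  unfold Spec_fitnessSelection
  unfold fitnessSelection fitnessSelection_alt
  rw [PySem.List.foldl_append_singleton_eq_map, List.nil_append]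
  have hmap : population.map (fun i => (PySem.List.pyRange 0 (i.length : Int) 1).foldl
      (fun summ j =>
        if PySem.List.pyGetD i j 0 == 1 then summ + PySem.List.pyGetD values j 0 else summ) 0)
      = population.map (fun c => fitB c values) :=
    List.map_congr_left (fun c hc => fitA_eq c values (hidx c hc))
  rw [hmap]
  set F := population.map (fun c => fitB c values) with hF
  have hFne : F ≠ [] := by
    intro h; apply hne; rw [hF] at h; exact List.map_eq_nil_iff.mp h
  obtain ⟨f0, Ft, hFcons⟩ := List.exists_cons_of_ne_nil hFne
  have hmin : PySem.List.min? F (fun x => x) = some (minF F) := by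
    rw [hFcons, PySem.List.min?_id_cons]; rfl
  have hMmem : minF F ∈ F := by
    rw [hFcons, minF]
    rcases PySem.List.foldl_min_mem Ft f0 with h | h
    · simp [h]
    · exact List.mem_cons_of_mem _ h
  obtain ⟨j, hj⟩ : ∃ j, PySem.List.index? F (minF F) = some j :=
    Option.isSome_iff_exists.mp ((PySem.List.index?_isSome_iff F (minF F)).mpr hMmem)
  obtain ⟨hjlen, hFj, _⟩ := PySem.List.getElem_of_index?_eq_some hj
  have hplen : j < population.length := by rw [hF] at hjlen; simpa using hjlen
  have hBinv := foldB_inv values population hne F (minF F) j hF rfl hj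
  have hstep : (population.foldl
      (fun (st : List (List Int) × List Int × Option (List Int × Int) × List (List Int) × List Int) c =>
        let f := fitB c values
        match st.2.2.1 with
        | none => (st.1, st.2.1, some (c, f), st.2.2.2.1, st.2.2.2.2)
        | some ch =>
          if f < ch.2 then
            (st.1 ++ [ch.1] ++ st.2.2.2.1, st.2.1 ++ [ch.2] ++ st.2.2.2.2, some (c, f), [], [])
          else
            (st.1, st.2.1, some ch, st.2.2.2.1 ++ [c], st.2.2.2.2 ++ [f]))
      ([], [], none, [], []))
      = population.foldl (stepB values) ([], [], none, [], []) := rfl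
  simp only [hmin]
  simp only [hj]
  dsimp only [Option.getD_some]
  rw [PySem.List.pop?_natCast population j hplen, PySem.List.pop?_natCast F j hjlen]
  dsimp only
  rw [hstep, hBinv]
  dsimp only
  rw [List.eraseIdx_eq_take_drop_succ, List.eraseIdx_eq_take_drop_succ]
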